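-- pv_equiv track=rewrite | github.com/ndcorder/research-agent | template/scripts/research-story.py | group_by_stage
-- ===== SOURCE A (Python) =====
-- from collections import Counter, defaultdict
--
-- def group_by_stage(entries):
--     """Group entries by stage, preserving order."""
--     groups = defaultdict(list)
--     stage_order = []
--     for e in entries:
--         stage = e.get("stage", "unknown")
--         if stage not in stage_order:
--             stage_order.append(stage)
--         groups[stage].append(e)
--     return groups, stage_order
-- ===== SOURCE B (Python) =====
-- from collections import defaultdict
--
-- def group_by_stage(entries):
--     """Group entries by stage, preserving order."""
--     stages = [e.get("stage", "unknown") for e in entries]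
--     stage_order = list(dict.fromkeys(stages))
--     groups = defaultdict(list)
--     for stage in stage_order:
--         groups[stage] = [e for s, e in zip(stages, entries) if s == stage]
--     return groups, stage_order
-- ===== Notes on version B (the rewrite author's own statement) =====
-- stated objective: alternative
-- what changed: B works in staged passes: it first extracts the stage key of every entry, dedups that list with dict.fromkeys to get the first-seen stage order, and then builds each group as a separate filter of the entries per stage, instead of A's single pass that appends into a defaultdict while maintaining a membership-tested order list.
import Mathlib
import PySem

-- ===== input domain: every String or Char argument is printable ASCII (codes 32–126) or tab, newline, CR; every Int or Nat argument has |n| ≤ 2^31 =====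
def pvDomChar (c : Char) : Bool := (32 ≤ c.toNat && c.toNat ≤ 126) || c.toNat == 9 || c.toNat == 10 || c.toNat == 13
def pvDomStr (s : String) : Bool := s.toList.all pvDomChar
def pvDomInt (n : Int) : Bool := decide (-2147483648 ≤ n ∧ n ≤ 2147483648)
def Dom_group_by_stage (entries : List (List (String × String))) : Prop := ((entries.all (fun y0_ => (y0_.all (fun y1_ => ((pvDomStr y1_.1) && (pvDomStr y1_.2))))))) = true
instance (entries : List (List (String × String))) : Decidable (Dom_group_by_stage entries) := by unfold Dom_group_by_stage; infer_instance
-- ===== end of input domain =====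

-- B groups in staged passes (stage list, dedup for the order, one filter per stage)
-- instead of A's single appending pass with a membership-tested order list.

-- ===== PORT A =====
-- e.get("stage", "unknown")
def pvStageOf (e : List (String × String)) : String :=
  (PySem.Dict.mk e).getD "stage" "unknown"

def group_by_stage (entries : List (List (String × String))) : (List (String × List (List (String × String)))) × List String :=
  let r := entries.foldl
    (fun (st : PySem.Dict String (List (List (String × String))) × List String) e =>
      let stage := pvStageOf e
      let order := if stage ∈ st.2 then st.2 else st.2 ++ [stage]
      (st.1.modify stage [] (fun g => g ++ [e]), order))
    (PySem.Dict.empty, [])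
  (r.1.items, r.2)

-- ===== PORT B =====
def group_by_stage_alt (entries : List (List (String × String))) : (List (String × List (List (String × String)))) × List String :=
  let stages := entries.map pvStageOf
  let order := PySem.List.dedup stages
  let groups := order.foldl
    (fun (d : PySem.Dict String (List (List (String × String)))) stage =>
      d.insert stage (((stages.zip entries).filter (fun p => p.1 == stage)).map Prod.snd))
    PySem.Dict.empty
  (groups.items, order)

-- ===== PRECONDITION & SPEC =====
def Spec_group_by_stage (entries : List (List (String × String))) (out : (List (String × List (List (String × String)))) × List String) : Prop := out = group_by_stage_alt entries
instance (entries : List (List (String × String))) (out : (List (String × List (List (String × String)))) × List String) : Decidable (Spec_group_by_stage entries out) := by unfold Spec_group_by_stage; infer_instance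

-- ===== CLAIM =====
def Claim_equal_group_by_stage : Prop := ∀ (entries : List (List (String × String))), Dom_group_by_stage entries → Spec_group_by_stage entries (group_by_stage entries)

-- ===== LEMMAS AND PROOFS =====

-- A's paired fold is the dict grouping fold together with a Set-style order fold.
theorem pvFoldA_eq (l : List (List (String × String)))
    (g : PySem.Dict String (List (List (String × String)))) (ord : List String) :
    l.foldl
      (fun (st : PySem.Dict String (List (List (String × String))) × List String) e =>
        let stage := pvStageOf e
        let order := if stage ∈ st.2 then st.2 else st.2 ++ [stage]
        (st.1.modify stage [] (fun gr => gr ++ [e]), order))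
      (g, ord)
    = (l.foldl (fun d e => d.modify (pvStageOf e) [] (fun gr => gr ++ [e])) g,
       l.foldl (fun o e => PySem.Set.add o (pvStageOf e)) ord) := by
  induction l generalizing g ord with
  | nil => rfl
  | cons e t ih =>
      simp only [List.foldl_cons, ih]
      rw [PySem.Set.add_eq_ite]

theorem pvZipMap {α β : Type} (f : α → β) (l : List α) :
    (l.map f).zip l = l.map (fun a => (f a, a)) := by
  induction l with
  | nil => rfl
  | cons x t ih => simp [ih]

-- A's order list is the ordered dedup of the stage list.
theorem pvOrderA_eq (entries : List (List (String × String))) :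
    entries.foldl (fun o e => PySem.Set.add o (pvStageOf e)) []
    = PySem.List.dedup (entries.map pvStageOf) := by
  rw [← PySem.Set.update_map_eq_foldl_add, PySem.Set.update_nil_left,
    PySem.List.dedup_eq_ofList]

-- A's grouping dict, as an items list: one pair per first-seen stage, with the filtered entries.
theorem pvItemsA_eq (entries : List (List (String × String))) :
    (entries.foldl (fun d e => d.modify (pvStageOf e) [] (fun gr => gr ++ [e]))
      (PySem.Dict.empty : PySem.Dict String (List (List (String × String))))).items
    = (PySem.List.dedup (entries.map pvStageOf)).map
        (fun st => (st, ((entries.map (fun e => (pvStageOf e, e))).filter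
          (fun p => p.1 == st)).map Prod.snd)) := by
  have hnd : (entries.foldl (fun d e => d.modify (pvStageOf e) [] (fun gr => gr ++ [e]))
      (PySem.Dict.empty : PySem.Dict String (List (List (String × String))))).keys.Nodup :=
    PySem.Dict.nodup_keys_foldl_modify_key entries pvStageOf []
      (fun _ e => fun gr => gr ++ [e]) _ PySem.Dict.nodup_keys_empty
  rw [PySem.Dict.items_eq_map_keys _ hnd []]
  have hk : (entries.foldl (fun d e => d.modify (pvStageOf e) [] (fun gr => gr ++ [e]))
      (PySem.Dict.empty : PySem.Dict String (List (List (String × String))))).keys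
      = PySem.List.dedup (entries.map pvStageOf) := by
    rw [PySem.Dict.keys_foldl_modify_key, PySem.Dict.keys_empty,
      PySem.Set.update_nil_left, PySem.List.dedup_eq_ofList]
  rw [hk]
  apply List.map_congr_left
  intro st _
  congr 1
  have : entries.foldl (fun d e => d.modify (pvStageOf e) [] (fun gr => gr ++ [e]))
      (PySem.Dict.empty : PySem.Dict String (List (List (String × String))))
      = (entries.map (fun e => (pvStageOf e, e))).foldl
          (fun d p => d.modify p.1 [] (fun gr => gr ++ [p.2])) PySem.Dict.empty := by
    rw [List.foldl_map]
  rw [this, PySem.Dict.getD_foldl_modify_append, PySem.Dict.getD_empty]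
  simp

-- B's per-stage insert loop appends exactly one fresh pair per stage.
theorem pvItemsB_eq (entries : List (List (String × String))) :
    ((PySem.List.dedup (entries.map pvStageOf)).foldl
      (fun (d : PySem.Dict String (List (List (String × String)))) stage =>
        d.insert stage ((((entries.map pvStageOf).zip entries).filter
          (fun p => p.1 == stage)).map Prod.snd))
      PySem.Dict.empty).items
    = (PySem.List.dedup (entries.map pvStageOf)).map
        (fun st => (st, ((entries.map (fun e => (pvStageOf e, e))).filter
          (fun p => p.1 == st)).map Prod.snd)) := by
  have h := PySem.Dict.items_foldl_insert_fresh
    (l := PySem.List.dedup (entries.map pvStageOf))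
    (k := fun st => st)
    (v := fun stage => (((entries.map pvStageOf).zip entries).filter
      (fun p => p.1 == stage)).map Prod.snd)
    (d := (PySem.Dict.empty : PySem.Dict String (List (List (String × String)))))
    (by intro a _; exact PySem.Dict.contains_empty a)
    (by simp)
  simp only [pvZipMap] at h
  simpa [PySem.Dict.empty, pvZipMap] using h

-- ===== VERDICT =====
theorem group_by_stage_spec : Claim_equal_group_by_stage := by
  intro entries _
  show group_by_stage entries = group_by_stage_alt entries
  unfold group_by_stage group_by_stage_alt
  simp only [pvFoldA_eq, pvOrderA_eq, pvItemsA_eq, pvItemsB_eq]
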